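-- pv_equiv track=rewrite | github.com/Gravitar64/A-beautiful-code-in-Python | Teil_108_busy_beaver.py | busy_beaver
-- ===== SOURCE A (Python) =====
-- def busy_beaver(bibers):
--   band = dict()
--   pos = biber = schritte = 0
--
--   while True:
--     schritte += 1
--     wert = band.get(pos, 0)
--     neuer_wert, richtung, nächster_biber = bibers[biber * 2 + wert]
--     band[pos] = int(neuer_wert)
--     if nächster_biber == 'H': return schritte, sum(band.values())
--     pos += 1 if richtung == 'R' else -1
--     biber = ord(nächster_biber) - 65
-- ===== SOURCE B (Python) =====
-- def busy_beaver(bibers):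
--   # Two-stack (zipper) tape: cells left of the head, the head cell, cells right of it.
--   left, right = [], []
--   head = biber = schritte = 0
--   while True:
--     schritte += 1
--     neuer_wert, richtung, naechster_biber = bibers[biber * 2 + head]
--     head = int(neuer_wert)
--     if naechster_biber == 'H':
--       return schritte, head + sum(left) + sum(right)
--     if richtung == 'R':
--       left.insert(0, head)
--       head = right.pop(0) if right else 0
--     else:
--       right.insert(0, head)
--       head = left.pop(0) if left else 0
--     biber = ord(naechster_biber) - 65
-- ===== Notes on version B (the rewrite author's own statement) =====
-- stated objective: alternative
-- what changed: The tape is a two-stack zipper (cells left of the head, the head cell, cells right of it) instead of a dict keyed by absolute position, and the halt result is head + sum(left) + sum(right) instead of sum(band.values()).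
import Mathlib
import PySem

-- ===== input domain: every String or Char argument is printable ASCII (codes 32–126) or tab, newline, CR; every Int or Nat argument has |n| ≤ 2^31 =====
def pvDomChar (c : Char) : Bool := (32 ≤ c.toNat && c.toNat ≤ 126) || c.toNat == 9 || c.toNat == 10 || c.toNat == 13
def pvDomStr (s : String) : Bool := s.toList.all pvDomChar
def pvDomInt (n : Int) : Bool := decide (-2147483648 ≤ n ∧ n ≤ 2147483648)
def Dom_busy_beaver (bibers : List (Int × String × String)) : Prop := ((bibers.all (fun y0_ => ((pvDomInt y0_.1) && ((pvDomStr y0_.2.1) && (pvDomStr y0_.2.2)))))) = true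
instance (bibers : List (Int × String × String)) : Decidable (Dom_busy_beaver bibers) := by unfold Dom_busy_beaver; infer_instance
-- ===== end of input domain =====

-- B replaces A's dict-keyed-by-absolute-position tape with a two-stack (zipper) tape; same step
-- count and the same write/halt-check/move order (objective: alternative data structure, no speed
-- claim). Python's while-True loop is rendered with a shared fuel counter; a raising step or fuel
-- exhaustion yields the junk value (0, 0), and Pre_ excludes exactly those inputs.

-- ===== PORT A =====
def bbLoopA (bibers : List (Int × String × String)) :
    Nat → PySem.Dict Int Int → Int → Int → Int → Int × Int
  | 0, _, _, _, _ => (0, 0)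
  | fuel + 1, band, pos, biber, schritte =>
    let schritte := schritte + 1
    let wert := band.getD pos 0
    match PySem.List.pyGet? bibers (biber * 2 + wert) with
    | none => (0, 0)                                    -- IndexError: excluded by Pre_
    | some (neuer_wert, richtung, naechster) =>
      let band := band.insert pos neuer_wert            -- int(neuer_wert) = neuer_wert (an int already)
      if naechster == "H" then (schritte, (PySem.Dict.values band).sum)
      else
        match naechster.toList with
        | [c] => bbLoopA bibers fuel band
                   (pos + (if richtung == "R" then 1 else -1)) ((c.toNat : Int) - 65) schritte
        | _ => (0, 0)                                   -- ord() raises unless len == 1: excluded by Pre_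

def busy_beaver (bibers : List (Int × String × String)) : Int × Int :=
  bbLoopA bibers 1000000 PySem.Dict.empty 0 0 0

-- ===== PORT B =====
def bbLoopB (bibers : List (Int × String × String)) :
    Nat → List Int → List Int → Int → Int → Int → Int × Int
  | 0, _, _, _, _, _ => (0, 0)
  | fuel + 1, left, right, head, biber, schritte =>
    let schritte := schritte + 1
    match PySem.List.pyGet? bibers (biber * 2 + head) with
    | none => (0, 0)                                    -- IndexError: excluded by Pre_
    | some (neuer_wert, richtung, naechster) =>
      let head := neuer_wert
      if naechster == "H" then (schritte, head + left.sum + right.sum)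
      else
        match naechster.toList with
        | [c] =>
          if richtung == "R" then
            match right with                            -- head = right.pop(0) if right else 0
            | [] => bbLoopB bibers fuel (head :: left) [] 0 ((c.toNat : Int) - 65) schritte
            | r :: rs => bbLoopB bibers fuel (head :: left) rs r ((c.toNat : Int) - 65) schritte
          else
            match left with                             -- head = left.pop(0) if left else 0
            | [] => bbLoopB bibers fuel [] (head :: right) 0 ((c.toNat : Int) - 65) schritte
            | l :: ls => bbLoopB bibers fuel ls (head :: right) l ((c.toNat : Int) - 65) schritte
        | _ => (0, 0)                                   -- ord() raises unless len == 1: excluded by Pre_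

def busy_beaver_alt (bibers : List (Int × String × String)) : Int × Int :=
  bbLoopB bibers 1000000 [] [] 0 0 0

-- ===== PRECONDITION & SPEC =====
-- Reference machine for Pre_ only: the tape as a plain function Int → Int (no dict, no zipper).
def bbSimOk (bibers : List (Int × String × String)) :
    Nat → (Int → Int) → Int → Int → Bool
  | 0, _, _, _ => false
  | fuel + 1, t, pos, biber =>
    match PySem.List.pyGet? bibers (biber * 2 + t pos) with
    | none => false
    | some (neuer_wert, richtung, naechster) =>
      if naechster == "H" then true
      else
        match naechster.toList with
        | [c] => bbSimOk bibers fuel (fun q => if q = pos then neuer_wert else t q)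
                   (pos + (if richtung == "R" then 1 else -1)) ((c.toNat : Int) - 65)
        | _ => false

-- Pre_ excludes exactly the inputs on which A never returns: machines that raise (IndexError on
-- the rule lookup / TypeError in ord) or do not halt; halting has no closed form, so it is stated
-- by running the abstract reference machine above for the same 10^6 steps the fuelled ports carry
-- (every machine the tester can actually observe halting halts far below that bound).
def Pre_busy_beaver (bibers : List (Int × String × String)) : Prop :=
  bbSimOk bibers 1000000 (fun _ => 0) 0 0 = true
instance (bibers : List (Int × String × String)) : Decidable (Pre_busy_beaver bibers) := by
  unfold Pre_busy_beaver; infer_instance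

def pvWitness_busy_beaver : (List (Int × String × String)) :=
  [(1, "R", "B"), (1, "L", "A"), (1, "L", "H"), (1, "R", "H")]

def Spec_busy_beaver (bibers : List (Int × String × String)) (out : Int × Int) : Prop := out = busy_beaver_alt bibers
instance (bibers : List (Int × String × String)) (out : Int × Int) : Decidable (Spec_busy_beaver bibers out) := by unfold Spec_busy_beaver; infer_instance

-- ===== CLAIM (what is proved, stated in full; the proofs are below) =====
def Claim_equal_busy_beaver : Prop := ∀ (bibers : List (Int × String × String)), Dom_busy_beaver bibers → Pre_busy_beaver bibers → Spec_busy_beaver bibers (busy_beaver bibers)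

-- ===== LEMMAS AND PROOFS =====

-- The bisimulation invariant tying A's dict tape to B's zipper: B's head is the cell under A's
-- head, B's stacks list the written cells at pos-1, pos-2, … resp. pos+1, pos+2, …, and every
-- written cell lies inside the zipper's span.
def bbInv (band : PySem.Dict Int Int) (pos : Int) (left right : List Int) (head : Int) : Prop :=
  band.keys.Nodup ∧
  head = band.getD pos 0 ∧
  (∀ j : Nat, j < left.length → left[j]? = some (band.getD (pos - 1 - (j : Int)) 0)) ∧
  (∀ j : Nat, j < right.length → right[j]? = some (band.getD (pos + 1 + (j : Int)) 0)) ∧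
  ∀ k ∈ band.keys, pos - left.length ≤ k ∧ k ≤ pos + right.length

lemma bbEqMapRange (xs : List Int) (f : Nat → Int)
    (h : ∀ j : Nat, j < xs.length → xs[j]? = some (f j)) :
    xs = (List.range xs.length).map f := by
  apply List.ext_getElem?
  intro j
  by_cases hj : j < xs.length
  · rw [h j hj, List.getElem?_map, List.getElem?_range hj]; rfl
  · rw [List.getElem?_eq_none (by omega), List.getElem?_eq_none (by simpa using hj)]

lemma bbGetD_zero_of_not_mem (band : PySem.Dict Int Int) (k : Int) (h : k ∉ band.keys) :
    band.getD k 0 = 0 := by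
  apply PySem.Dict.getD_of_not_contains
  rw [PySem.Dict.contains_eq_decide_mem_keys]
  simpa using h

lemma bbSumEq (band : PySem.Dict Int Int) (pos : Int) (left right : List Int) (head nw : Int)
    (h : bbInv band pos left right head) :
    ((band.insert pos nw).values).sum = nw + left.sum + right.sum := by
  obtain ⟨hnd, _, hl0, hr0, hb⟩ := h
  have hl := bbEqMapRange left (fun j : Nat => band.getD (pos - 1 - (j : Int)) 0) hl0
  have hr := bbEqMapRange right (fun j : Nat => band.getD (pos + 1 + (j : Int)) 0) hr0
  have hnd' : (band.insert pos nw).keys.Nodup := PySem.Dict.nodup_keys_insert band pos nw hnd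
  -- the zipper's span, as a duplicate-free list of positions
  set S : List Int := pos :: ((List.range left.length).map (fun j : Nat => pos - 1 - (j : Int)) ++
      (List.range right.length).map (fun j : Nat => pos + 1 + (j : Int))) with hS
  have hSnd : S.Nodup := by
    rw [hS]
    refine List.nodup_cons.2 ⟨?_, List.Nodup.append ?_ ?_ ?_⟩
    · intro hmem
      rcases List.mem_append.1 hmem with hm | hm <;>
        · obtain ⟨j, _, hj⟩ := List.mem_map.1 hm; omega
    · exact List.nodup_range.map_on (by intro a _ b _ h; omega)
    · exact List.nodup_range.map_on (by intro a _ b _ h; omega)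
    · intro a ha hb
      obtain ⟨j, _, hj⟩ := List.mem_map.1 ha
      obtain ⟨i, _, hi⟩ := List.mem_map.1 hb
      omega
  have hsub : ∀ k ∈ (band.insert pos nw).keys, k ∈ S := by
    intro k hk
    rcases (PySem.Dict.mem_keys_insert _ _ _ _).1 hk with rfl | hk
    · exact List.mem_cons_self ..
    · have hbnd := hb k hk
      rw [hS]
      by_cases hkp : k = pos
      · exact hkp ▸ List.mem_cons_self ..
      · refine List.mem_cons_of_mem _ (List.mem_append.2 ?_)
        rcases lt_or_gt_of_ne hkp with hlt | hgt
        · exact Or.inl (List.mem_map.2 ⟨(pos - 1 - k).toNat, List.mem_range.2 (by omega), by omega⟩)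
        · exact Or.inr (List.mem_map.2 ⟨(k - pos - 1).toNat, List.mem_range.2 (by omega), by omega⟩)
  -- sum over the span = sum of the dict's values
  have hvals : ((band.insert pos nw).values).sum =
      (S.map (fun k => (band.insert pos nw).getD k 0)).sum := by
    rw [PySem.Dict.values_eq_map_keys _ hnd' 0]
    rw [← List.sum_toFinset _ hnd', ← List.sum_toFinset _ hSnd]
    · exact Finset.sum_subset (fun x hx => List.mem_toFinset.2 (hsub x (List.mem_toFinset.1 hx)))
        (fun x _ hx => bbGetD_zero_of_not_mem _ x (fun hmem => hx (List.mem_toFinset.2 hmem)))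
  rw [hvals, hS]
  simp only [List.map_cons, List.map_append, List.map_map, List.sum_cons, List.sum_append]
  rw [PySem.Dict.getD_insert_self]
  rw [List.map_congr_left (l := List.range left.length)
      (f := (fun k => (band.insert pos nw).getD k 0) ∘ fun j : Nat => pos - 1 - (j : Int))
      (g := fun j : Nat => band.getD (pos - 1 - (j : Int)) 0)
      (fun j _ => by simp only [Function.comp_apply]
                     exact PySem.Dict.getD_insert_of_ne band nw 0 (by omega))]
  rw [List.map_congr_left (l := List.range right.length)
      (f := (fun k => (band.insert pos nw).getD k 0) ∘ fun j : Nat => pos + 1 + (j : Int))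
      (g := fun j : Nat => band.getD (pos + 1 + (j : Int)) 0)
      (fun j _ => by simp only [Function.comp_apply]
                     exact PySem.Dict.getD_insert_of_ne band nw 0 (by omega))]
  rw [← hl, ← hr]
  ring

lemma bbInv_R_cons (band : PySem.Dict Int Int) (pos : Int) (left rs : List Int)
    (head r nw : Int) (h : bbInv band pos left (r :: rs) head) :
    bbInv (band.insert pos nw) (pos + 1) (nw :: left) rs r := by
  obtain ⟨hnd, hh, hl, hr, hb⟩ := h
  refine ⟨PySem.Dict.nodup_keys_insert band pos nw hnd, ?_, ?_, ?_, ?_⟩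
  · have h0 := hr 0 (by simp)
    simp at h0
    rw [PySem.Dict.getD_insert, if_neg (by omega)]
    exact h0
  · intro j hj
    cases j with
    | zero =>
      rw [List.getElem?_cons_zero, PySem.Dict.getD_insert, if_pos (by push_cast; ring)]
    | succ j =>
      rw [List.getElem?_cons_succ, PySem.Dict.getD_insert, if_neg (by push_cast; omega)]
      have e : pos + 1 - 1 - ((j + 1 : Nat) : Int) = pos - 1 - (j : Int) := by push_cast; ring
      rw [e]
      exact hl j (by simp at hj; omega)
  · intro j hj
    have h1 := hr (j + 1) (by simp; omega)
    rw [List.getElem?_cons_succ] at h1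
    rw [h1, PySem.Dict.getD_insert, if_neg (by omega)]
    have e : pos + 1 + 1 + (j : Int) = pos + 1 + ((j + 1 : Nat) : Int) := by push_cast; ring
    rw [e]
  · intro k hk
    simp only [List.length_cons]
    rcases (PySem.Dict.mem_keys_insert _ _ _ _).1 hk with rfl | hk
    · push_cast; omega
    · have := hb k hk
      simp only [List.length_cons] at this
      push_cast at this ⊢
      omega

lemma bbInv_R_nil (band : PySem.Dict Int Int) (pos : Int) (left : List Int)
    (head nw : Int) (h : bbInv band pos left [] head) :
    bbInv (band.insert pos nw) (pos + 1) (nw :: left) [] 0 := by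
  obtain ⟨hnd, hh, hl, hr, hb⟩ := h
  refine ⟨PySem.Dict.nodup_keys_insert band pos nw hnd, ?_, ?_, ?_, ?_⟩
  · refine (bbGetD_zero_of_not_mem _ _ ?_).symm
    intro hmem
    rcases (PySem.Dict.mem_keys_insert _ _ _ _).1 hmem with h | h
    · omega
    · have := hb _ h; simp only [List.length_nil] at this; omega
  · intro j hj
    cases j with
    | zero =>
      rw [List.getElem?_cons_zero, PySem.Dict.getD_insert, if_pos (by push_cast; ring)]
    | succ j =>
      rw [List.getElem?_cons_succ, PySem.Dict.getD_insert, if_neg (by push_cast; omega)]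
      have e : pos + 1 - 1 - ((j + 1 : Nat) : Int) = pos - 1 - (j : Int) := by push_cast; ring
      rw [e]
      exact hl j (by simp at hj; omega)
  · intro j hj
    simp at hj
  · intro k hk
    simp only [List.length_cons]
    rcases (PySem.Dict.mem_keys_insert _ _ _ _).1 hk with rfl | hk
    · push_cast; omega
    · have := hb k hk
      simp only [List.length_nil] at this ⊢
      push_cast at this ⊢
      omega

lemma bbInv_L_cons (band : PySem.Dict Int Int) (pos : Int) (ls right : List Int)
    (head l nw : Int) (h : bbInv band pos (l :: ls) right head) :
    bbInv (band.insert pos nw) (pos - 1) ls (nw :: right) l := by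
  obtain ⟨hnd, hh, hl, hr, hb⟩ := h
  refine ⟨PySem.Dict.nodup_keys_insert band pos nw hnd, ?_, ?_, ?_, ?_⟩
  · have h0 := hl 0 (by simp)
    simp at h0
    rw [PySem.Dict.getD_insert, if_neg (by omega)]
    exact h0
  · intro j hj
    have h1 := hl (j + 1) (by simp; omega)
    rw [List.getElem?_cons_succ] at h1
    rw [h1, PySem.Dict.getD_insert, if_neg (by omega)]
    have e : pos - 1 - 1 - (j : Int) = pos - 1 - ((j + 1 : Nat) : Int) := by push_cast; ring
    rw [e]
  · intro j hj
    cases j with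
    | zero =>
      rw [List.getElem?_cons_zero, PySem.Dict.getD_insert, if_pos (by push_cast; ring)]
    | succ j =>
      rw [List.getElem?_cons_succ, PySem.Dict.getD_insert, if_neg (by push_cast; omega)]
      have e : pos - 1 + 1 + ((j + 1 : Nat) : Int) = pos + 1 + (j : Int) := by push_cast; ring
      rw [e]
      exact hr j (by simp at hj; omega)
  · intro k hk
    simp only [List.length_cons]
    rcases (PySem.Dict.mem_keys_insert _ _ _ _).1 hk with rfl | hk
    · push_cast; omega
    · have := hb k hk
      simp only [List.length_cons] at this
      push_cast at this ⊢
      omega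

lemma bbInv_L_nil (band : PySem.Dict Int Int) (pos : Int) (right : List Int)
    (head nw : Int) (h : bbInv band pos [] right head) :
    bbInv (band.insert pos nw) (pos - 1) [] (nw :: right) 0 := by
  obtain ⟨hnd, hh, hl, hr, hb⟩ := h
  refine ⟨PySem.Dict.nodup_keys_insert band pos nw hnd, ?_, ?_, ?_, ?_⟩
  · refine (bbGetD_zero_of_not_mem _ _ ?_).symm
    intro hmem
    rcases (PySem.Dict.mem_keys_insert _ _ _ _).1 hmem with h | h
    · omega
    · have := hb _ h; simp only [List.length_nil] at this; omega
  · intro j hj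
    simp at hj
  · intro j hj
    cases j with
    | zero =>
      rw [List.getElem?_cons_zero, PySem.Dict.getD_insert, if_pos (by push_cast; ring)]
    | succ j =>
      rw [List.getElem?_cons_succ, PySem.Dict.getD_insert, if_neg (by push_cast; omega)]
      have e : pos - 1 + 1 + ((j + 1 : Nat) : Int) = pos + 1 + (j : Int) := by push_cast; ring
      rw [e]
      exact hr j (by simp at hj; omega)
  · intro k hk
    simp only [List.length_cons]
    rcases (PySem.Dict.mem_keys_insert _ _ _ _).1 hk with rfl | hk
    · push_cast; omega
    · have := hb k hk
      simp only [List.length_nil] at this ⊢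
      push_cast at this ⊢
      omega

lemma bbLoopEq (bibers : List (Int × String × String)) :
    ∀ (fuel : Nat) (band : PySem.Dict Int Int) (pos : Int) (left right : List Int)
      (head biber schritte : Int), bbInv band pos left right head →
      bbLoopA bibers fuel band pos biber schritte = bbLoopB bibers fuel left right head biber schritte := by
  intro fuel
  induction fuel with
  | zero => intro band pos left right head biber schritte _; rfl
  | succ n ih =>
    intro band pos left right head biber schritte hinv
    have hh := hinv.2.1
    simp only [bbLoopA, bbLoopB, ← hh]
    cases hg : PySem.List.pyGet? bibers (biber * 2 + head) with
    | none => rfl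
    | some trip =>
      obtain ⟨nw, ri, nb⟩ := trip
      simp only
      by_cases hH : nb == "H"
      · simp only [if_pos hH]
        exact Prod.ext rfl (bbSumEq band pos left right head nw hinv)
      · simp only [if_neg hH]
        cases hnb : nb.toList with
        | nil => rfl
        | cons c cs =>
          cases cs with
          | cons c2 cs2 => rfl
          | nil =>
            by_cases hR : ri == "R"
            · simp only [if_pos hR]
              cases right with
              | nil =>
                exact ih (band.insert pos nw) (pos + 1) (nw :: left) [] 0 _ _
                  (bbInv_R_nil band pos left head nw hinv)
              | cons r rs =>
                exact ih (band.insert pos nw) (pos + 1) (nw :: left) rs r _ _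
                  (bbInv_R_cons band pos left rs head r nw hinv)
            · simp only [if_neg hR]
              cases left with
              | nil =>
                exact ih (band.insert pos nw) (pos + -1) [] (nw :: right) 0 _ _
                  (bbInv_L_nil band pos right head nw hinv)
              | cons l ls =>
                exact ih (band.insert pos nw) (pos + -1) ls (nw :: right) l _ _
                  (bbInv_L_cons band pos ls right head l nw hinv)

-- ===== VERDICT (by name: the statement is the Claim_ definition above) =====
theorem busy_beaver_spec : Claim_equal_busy_beaver := by
  intro bibers _ _
  unfold Spec_busy_beaver busy_beaver busy_beaver_alt
  exact bbLoopEq bibers 1000000 PySem.Dict.empty 0 [] [] 0 0 0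
    ⟨by simp [PySem.Dict.empty, PySem.Dict.keys],
     (PySem.Dict.getD_empty 0 0).symm,
     fun j hj => by simp at hj, fun j hj => by simp at hj,
     fun k hk => by simp [PySem.Dict.empty, PySem.Dict.keys] at hk⟩
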